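-- pv_equiv track=rewrite | github.com/maria-pugacheva/LeetCode | src/python/_01_easy/_1342_number-of-steps-to-reduce-a-number-to-zero.py | solution_two
-- ===== SOURCE A (Python) =====
-- def solution_two(num: int) -> int:
--     """Return the number of steps to reduce num to zero. In one step,
--     if the current number is even, you have to divide it by 2;
--     otherwise, you have to subtract 1 from it.
--
--     Preconditions:
--         0 <= n <= 10^6
--
--     Examples:
--         >>> solution_two(0)
--         0
--         >>> solution_two(8)
--         4
--         >>> solution_two(123)
--         12
--     """
--     if num == 0:
--         return 0
--     cnt, n = 0, bin(num)
--     for i in range(len(n) - 1, 1, -1):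
--         if n[i] == '1' and i != 2:
--             cnt += 1
--         cnt += 1
--     return cnt
-- ===== SOURCE B (Python) =====
-- def solution_two(num: int) -> int:
--     steps = 0
--     while num > 0:
--         if num % 2 == 0:
--             num //= 2
--         else:
--             num -= 1
--         steps += 1
--     return steps
-- ===== Notes on version B (the rewrite author's own statement) =====
-- stated objective: simpler
-- what changed: B simulates the reduction directly with a while-loop on the number (halve if even, decrement if odd, counting steps) instead of A's analysis of the bin(num) string by indexed iteration.
-- outside the precondition, e.g. on solution_two(-5): A returns 6, B returns 0
import Mathlib
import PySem

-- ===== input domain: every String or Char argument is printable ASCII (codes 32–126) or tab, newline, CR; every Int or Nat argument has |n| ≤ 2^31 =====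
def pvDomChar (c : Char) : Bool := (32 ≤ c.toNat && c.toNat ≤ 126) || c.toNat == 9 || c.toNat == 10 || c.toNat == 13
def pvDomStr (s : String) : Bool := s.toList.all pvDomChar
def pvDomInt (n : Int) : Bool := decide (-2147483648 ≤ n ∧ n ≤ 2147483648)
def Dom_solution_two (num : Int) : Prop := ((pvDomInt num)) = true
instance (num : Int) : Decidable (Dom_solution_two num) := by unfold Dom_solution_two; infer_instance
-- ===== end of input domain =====

-- B replaces A's indexed scan over the bin(num) string by a direct while-loop simulation
-- of the reduction (halve if even, else decrement), counting the steps: simpler, same cost.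

-- ===== PORT A =====
def solution_two (num : Int) : Int :=
  if num = 0 then 0
  else
    let n := PySem.Int.pyBin num
    (PySem.List.pyRange (PySem.Str.len n - 1) 1 (-1)).foldl
      (fun cnt i =>
        let cnt := if PySem.Str.pyGet? n i = some '1' ∧ i ≠ 2 then cnt + 1 else cnt
        cnt + 1) 0

-- ===== PORT B =====
-- Source B's 'while num > 0' loop; for num ≤ 0 Python's loop body never runs, matching n = 0 here.
def altLoop (n : Nat) (steps : Nat) : Nat :=
  if n = 0 then steps
  else if n % 2 = 0 then altLoop (n / 2) (steps + 1)
  else altLoop (n - 1) (steps + 1)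
termination_by n
decreasing_by
· exact Nat.div_lt_self (Nat.pos_of_ne_zero (by assumption)) (by omega)
· have : n ≠ 0 := by assumption
  omega

def solution_two_alt (num : Int) : Int := Int.ofNat (altLoop num.toNat 0)

-- ===== PRECONDITION & SPEC =====
-- Pre_ restricts to the function's stated natural domain 0 <= num (A's docstring precondition);
-- on negative num A counts characters of '-0b…' to a meaningless nonzero value while B returns 0.
def Pre_solution_two (num : Int) : Prop := 0 ≤ num
instance (num : Int) : Decidable (Pre_solution_two num) := by unfold Pre_solution_two; infer_instance
def pvWitness_solution_two : Int := (123)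

def Spec_solution_two (num : Int) (out : Int) : Prop := out = solution_two_alt num
instance (num : Int) (out : Int) : Decidable (Spec_solution_two num out) := by unfold Spec_solution_two; infer_instance

-- ===== CLAIM (what is proved, stated in full; the proofs are below) =====
def Claim_equal_solution_two : Prop := ∀ (num : Int), Dom_solution_two num → Pre_solution_two num → Spec_solution_two num (solution_two num)

-- ===== LEMMAS AND PROOFS =====

-- fuel-stability of Nat.toDigitsCore
theorem toDigitsCore_stable (b : Nat) (hb : 2 ≤ b) :
    ∀ (f f' n : Nat) (l : List Char), n < f → n < f' →
      Nat.toDigitsCore b f n l = Nat.toDigitsCore b f' n l := by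
  intro f
  induction f with
  | zero => intro f' n l h; omega
  | succ g ih =>
    intro f' n l h h'
    cases f' with
    | zero => omega
    | succ g' =>
      simp only [Nat.toDigitsCore]
      by_cases hnb : n / b = 0
      · simp [hnb]
      · simp only [hnb, if_false]
        have hge : b ≤ n := by
          by_contra hlt
          exact hnb (Nat.div_eq_of_lt (by omega))
        have hlt : n / b < n := Nat.div_lt_self (by omega) (by omega)
        exact ih g' (n / b) _ (by omega) (by omega)

theorem toDigitsCore_append (b : Nat) :
    ∀ (f n : Nat) (l : List Char),
      Nat.toDigitsCore b f n l = Nat.toDigitsCore b f n [] ++ l := by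
  intro f
  induction f with
  | zero => intro n l; simp [Nat.toDigitsCore]
  | succ g ih =>
    intro n l
    simp only [Nat.toDigitsCore]
    by_cases hnb : n / b = 0
    · simp [hnb]
    · simp only [hnb, if_false]
      rw [ih (n / b) ((n % b).digitChar :: l), ih (n / b) [(n % b).digitChar]]
      simp

theorem toDigits_two_rec (m : Nat) (h : 2 ≤ m) :
    Nat.toDigits 2 m = Nat.toDigits 2 (m / 2) ++ [Nat.digitChar (m % 2)] := by
  unfold Nat.toDigits
  conv_lhs => rw [Nat.toDigitsCore]
  have h2 : m / 2 ≠ 0 := by omega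
  simp only [h2, if_false]
  rw [toDigitsCore_append 2 m (m / 2)]
  congr 1
  exact toDigitsCore_stable 2 (by omega) m (m / 2 + 1) (m / 2) []
    (Nat.div_lt_self (by omega) (by omega)) (by omega)

theorem toDigits_head (m : Nat) (hm : 0 < m) :
    ∃ t, Nat.toDigits 2 m = '1' :: t := by
  induction m using Nat.strong_induction_on with
  | _ m ih =>
    by_cases h1 : m = 1
    · exact ⟨[], by subst h1; decide⟩
    · have h2 : 2 ≤ m := by omega
      obtain ⟨t, ht⟩ := ih (m / 2) (Nat.div_lt_self (by omega) (by omega)) (by omega)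
      exact ⟨t ++ [Nat.digitChar (m % 2)], by rw [toDigits_two_rec m h2, ht]; simp⟩

-- the A-side loop, as a sum over the countdown range, in closed form
theorem loopA (bits : List Char) :
    ((PySem.List.pyRange ((bits.length : Int) + 1) 1 (-1)).map
      (fun i => (1 : Int) +
        (if PySem.Chars.pyGet? ('0' :: 'b' :: bits) i = some '1' ∧ i ≠ 2 then 1 else 0))).sum
    = (bits.length : Int) + (((bits.drop 1).count '1' : Nat) : Int) := by
  induction bits using List.reverseRecOn with
  | nil => rw [PySem.List.pyRange_neg_one_eq_nil (by norm_num)]; simp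
  | append_singleton ys c ih =>
    have hlen : ((ys ++ [c]).length : Int) + 1 = (ys.length : Int) + 2 := by
      simp; omega
    rw [hlen, PySem.List.pyRange_neg_one_cons (by omega)]
    simp only [List.map_cons, List.sum_cons]
    have hget : PySem.Chars.pyGet? ('0' :: 'b' :: (ys ++ [c])) ((ys.length : Int) + 2) = some c := by
      have h := PySem.List.pyGet?_append_right ('0' :: 'b' :: ys) [c] 0
      simp only [PySem.Chars.pyGet?]
      rw [show ('0' :: 'b' :: (ys ++ [c])) = ('0' :: 'b' :: ys) ++ [c] by simp,
          show ((ys.length : Int) + 2) = ((('0' :: 'b' :: ys).length : Int) + ((0 : Nat) : Int)) by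
            simp; omega]
      simpa using h
    have htail : ((ys.length : Int) + 2) - 1 = (ys.length : Int) + 1 := by ring
    rw [htail]
    have hcongr :
        ((PySem.List.pyRange ((ys.length : Int) + 1) 1 (-1)).map
          (fun i => (1 : Int) +
            (if PySem.Chars.pyGet? ('0' :: 'b' :: (ys ++ [c])) i = some '1' ∧ i ≠ 2 then 1 else 0)))
        = ((PySem.List.pyRange ((ys.length : Int) + 1) 1 (-1)).map
          (fun i => (1 : Int) +
            (if PySem.Chars.pyGet? ('0' :: 'b' :: ys) i = some '1' ∧ i ≠ 2 then 1 else 0))) := by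
      apply List.map_congr_left
      intro i hi
      have hmem := (PySem.List.mem_pyRange_neg_one).mp hi
      have h0 : 0 ≤ i := by omega
      have hlt : i < (('0' :: 'b' :: ys).length : Int) := by simp; omega
      have : PySem.Chars.pyGet? ('0' :: 'b' :: (ys ++ [c])) i
           = PySem.Chars.pyGet? ('0' :: 'b' :: ys) i := by
        have hpre : ('0' :: 'b' :: (ys ++ [c])) = ('0' :: 'b' :: ys) ++ [c] := by simp
        simp only [PySem.Chars.pyGet?]
        rw [hpre, PySem.List.pyGet?_of_nonneg _ h0, PySem.List.pyGet?_of_nonneg _ h0]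
        rw [List.getElem?_append_left (by simp; omega)]
      rw [this]
    rw [hcongr, ih, hget]
    by_cases hys : ys = []
    · subst hys; simp
    · have hne2 : ((ys.length : Int) + 2) ≠ 2 := by
        have : ys.length ≠ 0 := by simpa using hys
        omega
      have hdrop : (ys ++ [c]).drop 1 = ys.drop 1 ++ [c] := by
        cases ys with
        | nil => exact absurd rfl hys
        | cons a as => simp
      rw [hdrop]
      by_cases hc : c = '1'
      · subst hc; simp [hne2]; ring
      · have hc0 : ([c].count '1') = 0 := by simp [hc]
        simp [hne2, hc, List.count_append, hc0]
        ring

-- closed form for A on positive inputs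
theorem solution_two_pos (m : Nat) (hm : 0 < m) :
    solution_two (m : Int)
      = ((Nat.toDigits 2 m).length : Int) + (((Nat.toDigits 2 m).drop 1).count '1' : Nat) := by
  have hne : (m : Int) ≠ 0 := by omega
  have hbits : (PySem.Int.pyBin (m : Int)).toList = '0' :: 'b' :: Nat.toDigits 2 m := by
    rw [PySem.Int.toList_pyBin]
    unfold PySem.Int.toBinChars0b
    rw [if_neg (by omega)]
    simp
  have hlen : PySem.Str.len (PySem.Int.pyBin (m : Int)) = ((Nat.toDigits 2 m).length : Int) + 2 := by
    unfold PySem.Str.len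
    rw [hbits]
    simp
    omega
  have hfn : (fun (cnt i : Int) =>
        (let cnt := if PySem.Str.pyGet? (PySem.Int.pyBin (m : Int)) i = some '1' ∧ i ≠ 2 then cnt + 1 else cnt
         cnt + 1))
      = (fun (cnt i : Int) => cnt +
          (1 + if PySem.Chars.pyGet? ('0' :: 'b' :: Nat.toDigits 2 m) i = some '1' ∧ i ≠ 2 then 1 else 0)) := by
    funext cnt i
    have hg : PySem.Str.pyGet? (PySem.Int.pyBin (m : Int)) i
        = PySem.Chars.pyGet? ('0' :: 'b' :: Nat.toDigits 2 m) i := by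
      unfold PySem.Str.pyGet? PySem.Chars.pyGet?
      rw [hbits]
    simp only [hg]
    split_ifs <;> ring
  unfold solution_two
  rw [if_neg hne]
  show (PySem.List.pyRange (PySem.Str.len (PySem.Int.pyBin (m : Int)) - 1) 1 (-1)).foldl
      (fun cnt i =>
        (let cnt := if PySem.Str.pyGet? (PySem.Int.pyBin (m : Int)) i = some '1' ∧ i ≠ 2 then cnt + 1 else cnt
         cnt + 1)) 0 = _
  rw [hfn, hlen]
  rw [show ((Nat.toDigits 2 m).length : Int) + 2 - 1 = ((Nat.toDigits 2 m).length : Int) + 1 by ring]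
  rw [PySem.List.foldl_add]
  rw [loopA (Nat.toDigits 2 m)]
  ring

-- accumulator shift for B's loop
theorem altLoop_acc (m : Nat) : ∀ c, altLoop m c = altLoop m 0 + c := by
  induction m using Nat.strong_induction_on with
  | _ m ih =>
    intro c
    by_cases h0 : m = 0
    · subst h0; simp [altLoop]
    · by_cases he : m % 2 = 0
      · conv_lhs => rw [altLoop]
        conv_rhs => rw [altLoop]
        simp only [h0, if_false, he, if_true]
        rw [ih (m / 2) (Nat.div_lt_self (by omega) (by omega)) (c + 1),
            ih (m / 2) (Nat.div_lt_self (by omega) (by omega)) 1]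
        omega
      · conv_lhs => rw [altLoop]
        conv_rhs => rw [altLoop]
        simp only [h0, if_false, he, if_true]
        rw [ih (m - 1) (by omega) (c + 1), ih (m - 1) (by omega) 1]
        omega

-- closed form for B on positive inputs
theorem altLoop_eq (m : Nat) (hm : 0 < m) :
    altLoop m 0 = (Nat.toDigits 2 m).length + (Nat.toDigits 2 m).count '1' - 1 := by
  induction m using Nat.strong_induction_on with
  | _ m ih =>
    by_cases h1 : m = 1
    · subst h1
      have h10 : altLoop 1 0 = 1 := by
        rw [altLoop]; norm_num; rw [altLoop]; norm_num
      rw [h10]; decide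
    · have h2 : 2 ≤ m := by omega
      have hrec := toDigits_two_rec m h2
      have hhalf : 0 < m / 2 := by omega
      have ihh := ih (m / 2) (Nat.div_lt_self (by omega) (by omega)) hhalf
      obtain ⟨t, ht⟩ := toDigits_head (m / 2) hhalf
      by_cases he : m % 2 = 0
      · rw [altLoop]
        simp only [show m ≠ 0 by omega, if_false, he, if_true]
        rw [altLoop_acc, ihh, hrec]
        have hdc : Nat.digitChar (m % 2) = '0' := by rw [he]; decide
        rw [hdc]
        simp [List.count_append, ht]
        omega
      · have hodd : m % 2 = 1 := by omega
        rw [altLoop]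
        simp only [show m ≠ 0 by omega, if_false, he]
        have hm1 : m - 1 ≠ 0 := by omega
        have hm1e : (m - 1) % 2 = 0 := by omega
        rw [altLoop_acc, altLoop]
        simp only [hm1, if_false, hm1e, if_true]
        rw [altLoop_acc]
        have hd : (m - 1) / 2 = m / 2 := by omega
        rw [hd, ihh, hrec]
        have hdc : Nat.digitChar (m % 2) = '1' := by rw [hodd]; decide
        rw [hdc]
        simp [List.count_append, ht]
        omega

-- ===== VERDICT (by name: the statement is the Claim_ definition above) =====
theorem solution_two_spec : Claim_equal_solution_two := by
  intro num _ hpre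
  unfold Spec_solution_two
  unfold Pre_solution_two at hpre
  obtain ⟨m, rfl⟩ : ∃ m : Nat, num = (m : Int) := ⟨num.toNat, by omega⟩
  by_cases hm : m = 0
  · subst hm
    have h0 : altLoop 0 0 = 0 := by rw [altLoop]; simp
    simp [solution_two, solution_two_alt, h0]
  · have hm' : 0 < m := by omega
    rw [solution_two_pos m hm']
    unfold solution_two_alt
    rw [Int.toNat_natCast, altLoop_eq m hm']
    obtain ⟨t, ht⟩ := toDigits_head m hm'
    rw [ht]
    simp
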